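-- pv_equiv track=rewrite | github.com/jusaviin/adventOfCode | 2020/day10/adapterCalculus.py | findNAllowedConfigurations
-- ===== SOURCE A (Python) =====
-- def findMaxDifference(sortedList, groundJoltage, deviceJoltage):
--
--     maxDifference = 0
--
--     for index in range(0, len(sortedList)-1):
--         difference = sortedList[index+1] - sortedList[index]
--         if difference > maxDifference:
--             maxDifference = difference
--
--     if maxDifference < (deviceJoltage - sortedList[len(sortedList)-1]):
--         maxDifference = deviceJoltage - sortedList[len(sortedList)-1]
--     if maxDifference < (sortedList[0] - groundJoltage):
--         maxDifference = sortedList[0] - groundJoltage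
--
--     return maxDifference
--
-- def findNAllowedConfigurations(outputJoltages):
--
--     # If try to remove one or more adapters and see if the configuration is still allowed
--     # Critical adapters (first and last index) are never removed
--     # This is kind of dirty and not generalizable, but works for this problem
--     allowedCount = 1
--     groundJoltage = outputJoltages[0]
--     deviceJoltage = outputJoltages[len(outputJoltages)-1]
--     for i in range(1,len(outputJoltages)-1):
--         element = outputJoltages[i]
--         newList = [thisJoltage for thisJoltage in outputJoltages]
--         newList.remove(element)
--         if findMaxDifference(newList, groundJoltage, deviceJoltage) <= 3:
--             allowedCount = allowedCount + 1
--         for j in range(i+1,len(outputJoltages)-1):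
--             newList = [thisJoltage for thisJoltage in outputJoltages]
--             element = outputJoltages[i]
--             newList.remove(element)
--             element = outputJoltages[j]
--             newList.remove(element)
--             if findMaxDifference(newList, groundJoltage, deviceJoltage) <= 3:
--                 allowedCount = allowedCount + 1
--             for k in range(j+1,len(outputJoltages)-1):
--                 newList = [thisJoltage for thisJoltage in outputJoltages]
--                 element = outputJoltages[i]
--                 newList.remove(element)
--                 element = outputJoltages[j]
--                 newList.remove(element)
--                 element = outputJoltages[k]
--                 newList.remove(element)
--                 if findMaxDifference(newList, groundJoltage, deviceJoltage) <= 3: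
--                     allowedCount = allowedCount + 1
--                 for l in range(k+1,len(outputJoltages)-1):
--                     newList = [thisJoltage for thisJoltage in outputJoltages]
--                     element = outputJoltages[i]
--                     newList.remove(element)
--                     element = outputJoltages[j]
--                     newList.remove(element)
--                     element = outputJoltages[k]
--                     newList.remove(element)
--                     element = outputJoltages[l]
--                     newList.remove(element)
--                     if findMaxDifference(newList, groundJoltage, deviceJoltage) <= 3:
--                         allowedCount = allowedCount + 1
--
--
--     return allowedCount
-- ===== SOURCE B (Python) =====
-- def findNAllowedConfigurations(outputJoltages):
--     # O(n) dynamic programming over positions: row[off-1][r] counts the ways to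
--     # delete exactly r of the interior positions idx..n-2 so that, with
--     # outputJoltages[idx-off] as the last kept element before idx, every gap in
--     # the kept chain up to outputJoltages[n-1] is at most 3.  With at most 4
--     # deletions in total a deleted run never exceeds 4, so offsets are capped at 5.
--     a = outputJoltages
--     n = len(a)
--     if n <= 2:
--         return 1
--     row = []
--     for off in range(1, 6):
--         p = n - 1 - off
--         ok = p >= 0 and a[n - 1] - a[p] <= 3
--         row.append([1 if (r == 0 and ok) else 0 for r in range(5)])
--     for idx in range(n - 2, 0, -1):
--         new = []
--         for off in range(1, 6):
--             p = idx - off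
--             if p >= 0:
--                 cur = []
--                 for r in range(5):
--                     c = 0
--                     if a[idx] - a[p] <= 3:
--                         c += row[0][r]          # keep position idx
--                     if r >= 1 and off < 5:
--                         c += row[off][r - 1]    # delete position idx
--                     cur.append(c)
--             else:
--                 cur = [0] * 5
--             new.append(cur)
--         row = new
--     return 1 + row[0][1] + row[0][2] + row[0][3] + row[0][4]
-- ===== Notes on version B (the rewrite author's own statement) =====
-- stated objective: faster
-- what changed: Replaces the quadruple-nested loops that rebuild and rescan a copy of the list for every subset of up to 4 removed interior adapters with a single linear DP sweep whose state is (offset of last kept element, number of removals used), counting keep/delete choices per position.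
-- outside the precondition, e.g. on findNAllowedConfigurations([5, 1, 3, 5, 3, 3]): A returns 10, B returns 14; on findNAllowedConfigurations([1, 4, 5, 5, 6, 9]): A returns 4, B returns 4
import Mathlib
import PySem

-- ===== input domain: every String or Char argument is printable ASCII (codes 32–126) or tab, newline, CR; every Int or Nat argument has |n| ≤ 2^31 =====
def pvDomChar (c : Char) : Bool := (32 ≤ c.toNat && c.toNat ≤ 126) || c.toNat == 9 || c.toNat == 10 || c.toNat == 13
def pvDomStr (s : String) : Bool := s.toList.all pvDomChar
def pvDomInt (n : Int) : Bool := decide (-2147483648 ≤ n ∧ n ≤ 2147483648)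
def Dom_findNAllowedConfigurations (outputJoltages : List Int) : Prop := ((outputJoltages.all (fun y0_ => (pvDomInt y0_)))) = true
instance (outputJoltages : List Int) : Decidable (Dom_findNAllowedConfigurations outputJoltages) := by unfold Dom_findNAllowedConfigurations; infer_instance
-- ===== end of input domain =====

-- B replaces A's O(n^5) brute-force enumeration of up-to-4 deletions by an O(n) dynamic
-- programming table over positions (state: offset of last kept element, deletions used).

-- ===== PORT A =====
def findMaxDifference (sortedList : List Int) (groundJoltage deviceJoltage : Int) : Int :=
  let maxDifference : Int :=
    (PySem.List.pyRange 0 ((sortedList.length : Int) - 1) 1).foldl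
      (fun maxDifference index =>
        let difference :=
          (PySem.List.pyGet? sortedList (index + 1)).getD 0 -
          (PySem.List.pyGet? sortedList index).getD 0
        if difference > maxDifference then difference else maxDifference) 0
  let maxDifference :=
    if maxDifference < deviceJoltage - (PySem.List.pyGet? sortedList ((sortedList.length : Int) - 1)).getD 0 then
      deviceJoltage - (PySem.List.pyGet? sortedList ((sortedList.length : Int) - 1)).getD 0
    else maxDifference
  let maxDifference :=
    if maxDifference < (PySem.List.pyGet? sortedList 0).getD 0 - groundJoltage then
      (PySem.List.pyGet? sortedList 0).getD 0 - groundJoltage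
    else maxDifference
  maxDifference

def findNAllowedConfigurations (outputJoltages : List Int) : Int :=
  let allowedCount : Int := 1
  let groundJoltage := (PySem.List.pyGet? outputJoltages 0).getD 0
  let deviceJoltage := (PySem.List.pyGet? outputJoltages ((outputJoltages.length : Int) - 1)).getD 0
  (PySem.List.pyRange 1 ((outputJoltages.length : Int) - 1) 1).foldl (fun allowedCount i =>
    let element := (PySem.List.pyGet? outputJoltages i).getD 0
    let newList := outputJoltages.map (fun thisJoltage => thisJoltage)
    let newList := (PySem.List.remove? newList element).getD []
    let allowedCount :=
      if findMaxDifference newList groundJoltage deviceJoltage ≤ 3 then allowedCount + 1 else allowedCount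
    (PySem.List.pyRange (i + 1) ((outputJoltages.length : Int) - 1) 1).foldl (fun allowedCount j =>
      let newList := outputJoltages.map (fun thisJoltage => thisJoltage)
      let element := (PySem.List.pyGet? outputJoltages i).getD 0
      let newList := (PySem.List.remove? newList element).getD []
      let element := (PySem.List.pyGet? outputJoltages j).getD 0
      let newList := (PySem.List.remove? newList element).getD []
      let allowedCount :=
        if findMaxDifference newList groundJoltage deviceJoltage ≤ 3 then allowedCount + 1 else allowedCount
      (PySem.List.pyRange (j + 1) ((outputJoltages.length : Int) - 1) 1).foldl (fun allowedCount k =>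
        let newList := outputJoltages.map (fun thisJoltage => thisJoltage)
        let element := (PySem.List.pyGet? outputJoltages i).getD 0
        let newList := (PySem.List.remove? newList element).getD []
        let element := (PySem.List.pyGet? outputJoltages j).getD 0
        let newList := (PySem.List.remove? newList element).getD []
        let element := (PySem.List.pyGet? outputJoltages k).getD 0
        let newList := (PySem.List.remove? newList element).getD []
        let allowedCount :=
          if findMaxDifference newList groundJoltage deviceJoltage ≤ 3 then allowedCount + 1 else allowedCount
        (PySem.List.pyRange (k + 1) ((outputJoltages.length : Int) - 1) 1).foldl (fun allowedCount l =>
          let newList := outputJoltages.map (fun thisJoltage => thisJoltage)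
          let element := (PySem.List.pyGet? outputJoltages i).getD 0
          let newList := (PySem.List.remove? newList element).getD []
          let element := (PySem.List.pyGet? outputJoltages j).getD 0
          let newList := (PySem.List.remove? newList element).getD []
          let element := (PySem.List.pyGet? outputJoltages k).getD 0
          let newList := (PySem.List.remove? newList element).getD []
          let element := (PySem.List.pyGet? outputJoltages l).getD 0
          let newList := (PySem.List.remove? newList element).getD []
          if findMaxDifference newList groundJoltage deviceJoltage ≤ 3 then allowedCount + 1 else allowedCount)
          allowedCount) allowedCount) allowedCount) allowedCount

-- ===== PORT B =====
def findNAllowedConfigurations_alt (outputJoltages : List Int) : Int :=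
  let a := outputJoltages
  let n : Int := (a.length : Int)
  if n ≤ 2 then 1 else
    let row : List (List Int) :=
      (PySem.List.pyRange 1 6 1).foldl (fun row off =>
        let p := n - 1 - off
        let ok := decide (p ≥ 0) && decide (PySem.List.pyGetD a (n - 1) 0 - PySem.List.pyGetD a p 0 ≤ 3)
        row ++ [(PySem.List.pyRange 0 5 1).map (fun r => if r = 0 ∧ ok = true then (1 : Int) else 0)]) []
    let row :=
      (PySem.List.pyRange (n - 2) 0 (-1)).foldl (fun row idx =>
        (PySem.List.pyRange 1 6 1).foldl (fun new off =>
          let p := idx - off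
          let cur :=
            if p ≥ 0 then
              (PySem.List.pyRange 0 5 1).foldl (fun cur r =>
                let c : Int := 0
                let c := if PySem.List.pyGetD a idx 0 - PySem.List.pyGetD a p 0 ≤ 3 then
                    c + PySem.List.pyGetD (PySem.List.pyGetD row 0 []) r 0 else c
                let c := if r ≥ 1 ∧ off < 5 then
                    c + PySem.List.pyGetD (PySem.List.pyGetD row off []) (r - 1) 0 else c
                cur ++ [c]) []
            else PySem.List.pyRepeat [(0 : Int)] 5
          new ++ [cur]) []) row
    1 + PySem.List.pyGetD (PySem.List.pyGetD row 0 []) 1 0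
      + PySem.List.pyGetD (PySem.List.pyGetD row 0 []) 2 0
      + PySem.List.pyGetD (PySem.List.pyGetD row 0 []) 3 0
      + PySem.List.pyGetD (PySem.List.pyGetD row 0 []) 4 0

-- ===== PRECONDITION & SPEC =====
-- Pre_ excludes the empty list, on which A raises IndexError, and lists with duplicate
-- values, on which A's remove-by-value deletes the first occurrence of the value instead of
-- the indexed element — a corner where removal-by-value and removal-by-position are both
-- defensible readings of "remove this adapter".
def Pre_findNAllowedConfigurations (outputJoltages : List Int) : Prop :=
  outputJoltages ≠ [] ∧ outputJoltages.Nodup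
instance (outputJoltages : List Int) : Decidable (Pre_findNAllowedConfigurations outputJoltages) := by
  unfold Pre_findNAllowedConfigurations; infer_instance

def pvWitness_findNAllowedConfigurations : List Int := [1, 4, 5, 6, 7, 10]

def Spec_findNAllowedConfigurations (outputJoltages : List Int) (out : Int) : Prop :=
  out = findNAllowedConfigurations_alt outputJoltages
instance (outputJoltages : List Int) (out : Int) : Decidable (Spec_findNAllowedConfigurations outputJoltages out) := by
  unfold Spec_findNAllowedConfigurations; infer_instance

-- ===== CLAIM (what is proved, stated in full; the proofs are below) =====
def Claim_equal_findNAllowedConfigurations : Prop := ∀ (outputJoltages : List Int), Dom_findNAllowedConfigurations outputJoltages → Pre_findNAllowedConfigurations outputJoltages → Spec_findNAllowedConfigurations outputJoltages (findNAllowedConfigurations outputJoltages)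


-- ===== LEMMAS AND PROOFS =====

theorem foldl_shift (l : List Int) (F : Int → Int → Int) (g : Int → Int) (init : Int)
    (h : ∀ acc : Int, ∀ i ∈ l, F acc i = acc + g i) :
    l.foldl F init = init + (l.map g).sum := by
  exact (PySem.List.foldl_congr_mem l F (fun acc i => acc + g i) init
    (fun acc x hx => h acc x hx)).trans (PySem.List.foldl_add l g init)

theorem foldl_if_max_le (l : List Int) (f : Int → Int) (c : Int) (init : Int) :
    (l.foldl (fun m i => if f i > m then f i else m) init ≤ c) ↔ (init ≤ c ∧ ∀ i ∈ l, f i ≤ c) := by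
  induction l generalizing init with
  | nil => simp
  | cons x t ih =>
    simp only [List.foldl_cons, ih, List.mem_cons]
    constructor
    · rintro ⟨h1, h2⟩
      split_ifs at h1 with hx
      · exact ⟨by omega, fun i hi => by rcases hi with rfl | hi; omega; exact h2 i hi⟩
      · exact ⟨h1, fun i hi => by rcases hi with rfl | hi; omega; exact h2 i hi⟩
    · rintro ⟨h1, h2⟩
      refine ⟨?_, fun i hi => h2 i (Or.inr hi)⟩
      have := h2 x (Or.inl rfl)
      split_ifs <;> omega

def gOK : List Int → Bool
  | [] => true
  | [_] => true
  | x :: y :: t => decide (y - x ≤ 3) && gOK (y :: t)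

theorem gOK_append (u v : List Int) (hu : u ≠ []) :
    gOK (u ++ v) = (gOK u && gOK (u.getLastD 0 :: v)) := by
  induction u with
  | nil => simp at hu
  | cons x t ih =>
    cases t with
    | nil => cases v <;> simp [gOK]
    | cons y s =>
      have := ih (by simp)
      simp only [List.cons_append, List.getLastD_cons] at *
      cases s <;> simp_all [gOK, Bool.and_assoc]

theorem gOK_iff_isChain (l : List Int) :
    gOK l = true ↔ List.IsChain (fun x y => y - x ≤ 3) l := by
  induction l with
  | nil => simp [gOK]
  | cons x t ih =>
    cases t with
    | nil => simp [gOK]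
    | cons y s =>
      simp only [gOK, Bool.and_eq_true, decide_eq_true_eq, List.isChain_cons_cons] at *
      tauto

def cnt (d : Int) : List Int → Int → Nat → Int
  | [], x, 0 => if d - x ≤ 3 then 1 else 0
  | [], _, _+1 => 0
  | y :: t, x, 0 => if y - x ≤ 3 then cnt d t y 0 else 0
  | y :: t, x, r+1 => (if y - x ≤ 3 then cnt d t y (r+1) else 0) + cnt d t x r

def scnt (d : Int) (t : List Int) (x : Int) : Nat → Int
  | 0 => 0
  | b+1 => scnt d t x b + cnt d t x (b+1)

theorem cnt_nil_succ (d x : Int) (r : Nat) : cnt d [] x (r+1) = 0 := rfl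

theorem scnt_nil (d x : Int) (b : Nat) : scnt d [] x b = 0 := by
  induction b with
  | zero => rfl
  | succ b ih => simp [scnt, ih, cnt_nil_succ]

theorem cnt_zero (d : Int) (t : List Int) (x : Int) :
    cnt d t x 0 = if gOK (x :: (t ++ [d])) = true then 1 else 0 := by
  induction t generalizing x with
  | nil => simp [cnt, gOK]
  | cons y t ih =>
    simp only [cnt, ih, List.cons_append, gOK, Bool.and_eq_true, decide_eq_true_eq]
    split_ifs <;> first | rfl | simp_all

theorem scnt_cons (d y x : Int) (t : List Int) (b : Nat) :
    scnt d (y :: t) x (b + 1) =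
      (if y - x ≤ 3 then scnt d t y (b + 1) else 0) + (cnt d t x 0 + scnt d t x b) := by
  induction b with
  | zero =>
    simp only [scnt, cnt]
    split_ifs <;> ring
  | succ b ih =>
    have : scnt d (y :: t) x (b + 2) = scnt d (y :: t) x (b + 1) + cnt d (y :: t) x (b + 2) := rfl
    rw [this, ih]
    show _ = _ + (cnt d t x 0 + (scnt d t x b + cnt d t x (b+1)))
    have hc : cnt d (y :: t) x (b + 2) = (if y - x ≤ 3 then cnt d t y (b+2) else 0) + cnt d t x (b+1) := rfl
    rw [hc]
    have hs : scnt d t y (b + 2) = scnt d t y (b+1) + cnt d t y (b+2) := rfl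
    split_ifs with h
    · rw [hs]; ring
    · ring

def delF (K : List Int) : List Int → Int → List Int
  | [], _ => []
  | x :: t, s => if s ∈ K then delF K t (s+1) else x :: delF K t (s+1)

theorem delF_sub (J J' : List Int) (l : List Int) (s : Int)
    (h : ∀ q : Int, s ≤ q → q < s + l.length → (q ∈ J ↔ q ∈ J')) :
    delF J l s = delF J' l s := by
  induction l generalizing s with
  | nil => rfl
  | cons x t ih =>
    have hs : s ∈ J ↔ s ∈ J' := h s le_rfl (by push_cast [List.length_cons]; omega)
    have ht : delF J t (s+1) = delF J' t (s+1) := ih (s+1) (fun q h1 h2 => h q (by omega)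
      (by push_cast [List.length_cons] at h2 ⊢; omega))
    simp only [delF, ht]
    by_cases hm : s ∈ J
    · rw [if_pos hm, if_pos (hs.mp hm)]
    · rw [if_neg hm, if_neg (fun c => hm (hs.mpr c))]

theorem delF_of_lt (J : List Int) (l : List Int) (s : Int) (h : ∀ q ∈ J, q < s) :
    delF J l s = l := by
  induction l generalizing s with
  | nil => rfl
  | cons x t ih =>
    have : s ∉ J := fun c => absurd (h s c) (by omega)
    simp only [delF, if_neg this, ih (s+1) (fun q hq => by have := h q hq; omega)]

theorem delF_nilK (l : List Int) (s : Int) : delF [] l s = l :=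
  delF_of_lt [] l s (by simp)

theorem delF_append (J : List Int) (u v : List Int) (s : Int) :
    delF J (u ++ v) s = delF J u s ++ delF J v (s + u.length) := by
  induction u generalizing s with
  | nil => simp [delF]
  | cons x t ih =>
    simp only [List.cons_append, delF, ih (s+1), List.length_cons]
    have : s + 1 + (t.length : Int) = s + ((t.length : Int) + 1) := by ring
    rw [this]
    by_cases hm : s ∈ J <;> simp [hm]

theorem delF_split (J : List Int) (a : List Int) (m : Nat) (hm : m ≤ a.length)
    (h : ∀ p ∈ J, p < (m : Int)) :
    delF J a 0 = delF J (a.take m) 0 ++ a.drop m := by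
  conv_lhs => rw [← List.take_append_drop m a]
  rw [delF_append]
  congr 1
  rw [List.length_take, Nat.min_eq_left hm]
  exact delF_of_lt _ _ _ (fun q hq => by have := h q hq; omega)

theorem remove_delF (l : List Int) (hnd : l.Nodup) (J : List Int) (s p : Int)
    (h1 : s ≤ p) (h2 : p < s + l.length) (h3 : p ∉ J) :
    PySem.List.remove? (delF J l s) ((PySem.List.pyGet? l (p - s)).getD 0) = some (delF (p :: J) l s) := by
  induction l generalizing J s with
  | nil => simp at h2; omega
  | cons x t ih =>
    by_cases hp : p = s
    · subst hp
      have hv : (PySem.List.pyGet? (x :: t) (p - p)).getD 0 = x := by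
        rw [sub_self, PySem.List.pyGet?_zero_cons]; rfl
      rw [hv]
      have hsJ : p ∉ J := h3
      have hL : delF J (x :: t) p = x :: delF J t (p+1) := by simp [delF, hsJ]
      have hR : delF (p :: J) (x :: t) p = delF (p :: J) t (p+1) := by simp [delF]
      rw [hL, hR, PySem.List.remove?_cons_self]
      congr 1
      refine delF_sub _ _ _ _ (fun q hq1 hq2 => ?_)
      simp only [List.mem_cons]
      constructor
      · exact fun h => Or.inr h
      · rintro (rfl | h); omega; exact h
    · have hps : s + 1 ≤ p := by omega
      have hk0 : 0 ≤ p - s - 1 := by omega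
      set k : Nat := (p - s - 1).toNat with hk
      have hpk : p - s = (k : Int) + 1 := by omega
      have hkt : k < t.length := by
        simp only [List.length_cons] at h2; omega
      have hval : (PySem.List.pyGet? (x :: t) (p - s)).getD 0 = t[k] := by
        rw [hpk, PySem.List.pyGet?_cons_succ, PySem.List.pyGet?_natCast]
        simp [hkt]
      have hxv : x ≠ t[k] := by
        intro hc
        have : x ∈ t := hc ▸ List.getElem_mem hkt
        exact (List.nodup_cons.mp hnd).1 this
      have hih := ih (List.Nodup.of_cons hnd) J (s+1) (by omega)
        (by simp only [List.length_cons] at h2 ⊢; omega) h3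
      have hih' : PySem.List.remove? (delF J t (s+1)) t[k] = some (delF (p :: J) t (s+1)) := by
        have : p - (s+1) = (k : Int) := by omega
        rw [this, PySem.List.pyGet?_natCast] at hih
        simpa [hkt] using hih
      rw [hval]
      by_cases hsJ : s ∈ J
      · have hL : delF J (x :: t) s = delF J t (s+1) := by simp [delF, hsJ]
        have hR : delF (p :: J) (x :: t) s = delF (p :: J) t (s+1) := by
          simp [delF, List.mem_cons, hsJ]
        rw [hL, hR, hih']
      · have hL : delF J (x :: t) s = x :: delF J t (s+1) := by simp [delF, hsJ]
        have hR : delF (p :: J) (x :: t) s = x :: delF (p :: J) t (s+1) := by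
          have : s ∉ p :: J := by simp [List.mem_cons]; exact ⟨by omega, hsJ⟩
          simp [delF, this]
        rw [hL, hR, PySem.List.remove?_cons_of_ne _ hxv, hih']
        rfl

theorem rmChain_aux (a : List Int) (hnd : a.Nodup) :
    ∀ (K J : List Int), K.Pairwise (· < ·) → (∀ p ∈ K, 0 ≤ p ∧ p < (a.length : Int)) →
    (∀ p ∈ K, p ∉ J) →
    K.foldl (fun nl p => (PySem.List.remove? nl ((PySem.List.pyGet? a p).getD 0)).getD [])
      (delF J a 0) = delF (K ++ J) a 0 := by
  intro K
  induction K with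
  | nil => intro J _ _ _; simp
  | cons p K ih =>
    intro J hpw hrange hnotJ
    have hp := hrange p (by simp)
    have hstep : (PySem.List.remove? (delF J a 0) ((PySem.List.pyGet? a p).getD 0)).getD [] =
        delF (p :: J) a 0 := by
      have := remove_delF a hnd J 0 p (by omega) (by omega) (hnotJ p (by simp))
      rw [show p - 0 = p by ring] at this
      rw [this]
      rfl
    simp only [List.foldl_cons, hstep]
    have hih := ih (p :: J) (List.Pairwise.of_cons hpw)
      (fun q hq => hrange q (by simp [hq]))
      (fun q hq => by
        simp only [List.mem_cons, not_or]
        refine ⟨?_, hnotJ q (by simp [hq])⟩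
        have := (List.pairwise_cons.mp hpw).1 q hq
        omega)
    rw [hih]
    refine delF_sub _ _ _ _ (fun q _ _ => ?_)
    simp only [List.mem_append, List.mem_cons]
    tauto

def rmChain (a : List Int) (K : List Int) : List Int :=
  K.foldl (fun nl p => (PySem.List.remove? nl ((PySem.List.pyGet? a p).getD 0)).getD []) a

theorem rmChain_eq_delF (a : List Int) (hnd : a.Nodup) (K : List Int)
    (hK : K.Pairwise (· < ·)) (hmem : ∀ p ∈ K, 0 ≤ p ∧ p < (a.length : Int)) :
    rmChain a K = delF K a 0 := by
  have := rmChain_aux a hnd K [] hK hmem (by simp)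
  rw [delF_nilK] at this
  simpa using this


theorem pyGet_last (l : List Int) (hl : l ≠ []) :
    (PySem.List.pyGet? l ((l.length : Int) - 1)).getD 0 = l.getLastD 0 := by
  have h1 : 0 < l.length := List.length_pos_iff.mpr hl
  have : ((l.length : Int) - 1) = ((l.length - 1 : Nat) : Int) := by omega
  rw [this, PySem.List.pyGet?_natCast]
  rw [List.getElem?_eq_getElem (by omega)]
  rw [List.getLastD_eq_getLast?, List.getLast?_eq_getElem?]
  rw [List.getElem?_eq_getElem (by omega)]

theorem pyGet_head (l : List Int) :
    (PySem.List.pyGet? l 0).getD 0 = l.headD 0 := by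
  rw [PySem.List.pyGet?_zero]
  cases l <;> rfl

theorem pyGet_mid (l : List Int) (i : Int) (h0 : 0 ≤ i) (h1 : i < l.length) :
    (PySem.List.pyGet? l i).getD 0 = l[i.toNat]! := by
  rw [PySem.List.pyGet?_of_nonneg _ h0]
  have : i.toNat < l.length := by omega
  rw [List.getElem?_eq_getElem this]
  simp [List.getElem!_eq_getElem?_getD, List.getElem?_eq_getElem this]

theorem gOK_iff_getElem (l : List Int) :
    gOK l = true ↔ ∀ i : Nat, i + 1 < l.length → l[i+1]! - l[i]! ≤ 3 := by
  rw [gOK_iff_isChain, List.isChain_iff_getElem]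
  constructor
  · intro h i hi
    have := h i hi
    rwa [List.getElem!_eq_getElem?_getD, List.getElem?_eq_getElem hi,
      List.getElem!_eq_getElem?_getD, List.getElem?_eq_getElem (by omega)]
  · intro h i hi
    have := h i hi
    rwa [List.getElem!_eq_getElem?_getD, List.getElem?_eq_getElem hi,
      List.getElem!_eq_getElem?_getD, List.getElem?_eq_getElem (by omega)] at this

theorem fmd_le3 (l : List Int) (g d : Int) (hl : l ≠ []) :
    (findMaxDifference l g d ≤ 3) ↔
      (gOK l = true ∧ d - l.getLastD 0 ≤ 3 ∧ l.headD 0 - g ≤ 3) := by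
  have hfold := foldl_if_max_le (PySem.List.pyRange 0 ((l.length : Int) - 1) 1)
    (fun i => (PySem.List.pyGet? l (i + 1)).getD 0 - (PySem.List.pyGet? l i).getD 0) 3 0
  have hiff : ((PySem.List.pyRange 0 ((l.length : Int) - 1) 1).foldl
      (fun m i => if (PySem.List.pyGet? l (i + 1)).getD 0 - (PySem.List.pyGet? l i).getD 0 > m then
        (PySem.List.pyGet? l (i + 1)).getD 0 - (PySem.List.pyGet? l i).getD 0 else m) 0 ≤ 3) ↔
      gOK l = true := by
    rw [hfold, gOK_iff_getElem]
    constructor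
    · intro h i hi
      have hm : (i : Int) ∈ PySem.List.pyRange 0 ((l.length : Int) - 1) 1 := by
        rw [PySem.List.mem_pyRange_one]; omega
      have := h.2 _ hm
      rwa [pyGet_mid l ((i:Int)+1) (by omega) (by push_cast; omega),
        pyGet_mid l (i:Int) (by omega) (by push_cast; omega),
        show ((i:Int)+1).toNat = i + 1 by omega, show ((i:Int)).toNat = i by omega] at this
    · intro h
      refine ⟨by omega, fun i hm => ?_⟩
      rw [PySem.List.mem_pyRange_one] at hm
      have := h i.toNat (by omega)
      rw [pyGet_mid l (i+1) (by omega) (by omega),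
        pyGet_mid l i (by omega) (by omega),
        show (i+1).toNat = i.toNat + 1 by omega]
      exact this
  unfold findMaxDifference
  simp only [pyGet_last l hl, pyGet_head l]
  constructor
  · intro h
    split_ifs at h with h1 h2 h2
    · exact ⟨hiff.mp (by omega), by omega, by omega⟩
    · exact ⟨hiff.mp (by omega), by omega, by omega⟩
    · exact ⟨hiff.mp (by omega), by omega, by omega⟩
    · exact ⟨hiff.mp (by omega), by omega, by omega⟩
  · rintro ⟨hg, ha, hb⟩
    have := hiff.mpr hg
    split_ifs <;> omega

theorem delF_cons_head (K : List Int) (a : List Int) (hl : a ≠ []) (h0 : (0:Int) ∉ K) :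
    delF K a 0 = a.headD 0 :: delF K a.tail 1 := by
  cases a with
  | nil => simp at hl
  | cons x t => simp [delF, h0]

theorem drop_pred (a : List Int) (hl : a ≠ []) :
    a.drop (a.length - 1) = [a.getLastD 0] := by
  have h1 : 0 < a.length := List.length_pos_iff.mpr hl
  rw [List.drop_eq_getElem_cons (by omega)]
  have : a.length - 1 + 1 = a.length := by omega
  rw [this, List.drop_length]
  congr 1
  rw [List.getLastD_eq_getLast?, List.getLast?_eq_getElem?, List.getElem?_eq_getElem (by omega)]
  rfl

theorem delF_last (K : List Int) (a : List Int) (hl : a ≠ [])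
    (h : ∀ p ∈ K, p < (a.length : Int) - 1) :
    (delF K a 0).getLastD 0 = a.getLastD 0 := by
  have h1 : 0 < a.length := List.length_pos_iff.mpr hl
  rw [delF_split K a (a.length - 1) (by omega) (fun p hp => by have := h p hp; omega)]
  rw [drop_pred a hl]
  rw [List.getLastD_eq_getLast?, List.getLast?_append]
  simp

def indA (a : List Int) (g d : Int) (K : List Int) : Int :=
  if findMaxDifference (rmChain a K) g d ≤ 3 then 1 else 0

theorem indA_eq (a : List Int) (hnd : a.Nodup) (hl : a ≠ []) (K : List Int)
    (hK : K.Pairwise (· < ·)) (hmem : ∀ p ∈ K, 1 ≤ p ∧ p < (a.length : Int) - 1) :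
    indA a (a.headD 0) (a.getLastD 0) K = if gOK (delF K a 0) = true then 1 else 0 := by
  have h1 : 0 < a.length := List.length_pos_iff.mpr hl
  rw [indA, rmChain_eq_delF a hnd K hK (fun p hp => by have := hmem p hp; constructor <;> omega)]
  have hz : (0:Int) ∉ K := fun c => by have := (hmem 0 c).1; omega
  have hne : delF K a 0 ≠ [] := by rw [delF_cons_head K a hl hz]; simp
  rw [if_congr (fmd_le3 _ _ _ hne) rfl rfl]
  have hh : (delF K a 0).headD 0 = a.headD 0 := by rw [delF_cons_head K a hl hz]; rfl
  have hla : (delF K a 0).getLastD 0 = a.getLastD 0 :=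
    delF_last K a hl (fun p hp => (hmem p hp).2)
  rw [hh, hla]
  have hiff : (gOK (delF K a 0) = true ∧ a.getLastD 0 - a.getLastD 0 ≤ 3 ∧
      a.headD 0 - a.headD 0 ≤ 3) ↔ gOK (delF K a 0) = true :=
    ⟨fun h => h.1, fun h => ⟨h, by omega, by omega⟩⟩
  rw [if_congr hiff rfl rfl]



def SB (a : List Int) (g d : Int) : Nat → Int → List Int → Int
  | 0, _, _ => 0
  | b+1, m, js => ((PySem.List.pyRange m ((a.length : Int) - 1) 1).map
      (fun i => indA a g d (js ++ [i]) + SB a g d b (i + 1) (js ++ [i]))).sum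

theorem SB_stop (a : List Int) (g d : Int) (b : Nat) (m : Int) (js : List Int)
    (h : (a.length : Int) - 1 ≤ m) : SB a g d b m js = 0 := by
  cases b with
  | zero => rfl
  | succ b => rw [SB, PySem.List.pyRange_one_eq_nil h]; rfl

theorem SB_cons (a : List Int) (g d : Int) (b : Nat) (m : Int) (js : List Int)
    (h : m < (a.length : Int) - 1) :
    SB a g d (b + 1) m js =
      indA a g d (js ++ [m]) + SB a g d b (m + 1) (js ++ [m]) + SB a g d (b + 1) (m + 1) js := by
  rw [SB, PySem.List.pyRange_one_cons h, List.map_cons, List.sum_cons, SB]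


theorem portA_eq_SB (a : List Int) :
    findNAllowedConfigurations a =
      1 + SB a ((PySem.List.pyGet? a 0).getD 0) ((PySem.List.pyGet? a ((a.length : Int) - 1)).getD 0) 4 1 [] := by
  set g := (PySem.List.pyGet? a 0).getD 0 with hg
  set d := (PySem.List.pyGet? a ((a.length : Int) - 1)).getD 0 with hd
  have hmap : a.map (fun thisJoltage => thisJoltage) = a := List.map_id' a
  unfold findNAllowedConfigurations
  simp only [hmap, ← hg, ← hd]
  have e1 : ∀ i : Int, (PySem.List.remove? a ((PySem.List.pyGet? a i).getD 0)).getD [] = rmChain a [i] :=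
    fun _ => rfl
  have e2 : ∀ i j : Int, (PySem.List.remove? (rmChain a [i]) ((PySem.List.pyGet? a j).getD 0)).getD [] = rmChain a [i, j] :=
    fun _ _ => rfl
  have e3 : ∀ i j k : Int, (PySem.List.remove? (rmChain a [i, j]) ((PySem.List.pyGet? a k).getD 0)).getD [] = rmChain a [i, j, k] :=
    fun _ _ _ => rfl
  have e4 : ∀ i j k l : Int, (PySem.List.remove? (rmChain a [i, j, k]) ((PySem.List.pyGet? a l).getD 0)).getD [] = rmChain a [i, j, k, l] :=
    fun _ _ _ _ => rfl
  simp only [e1, e2, e3, e4]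
  have hbase : ∀ (K : List Int) (acc : Int),
      (if findMaxDifference (rmChain a K) g d ≤ 3 then acc + 1 else acc) = acc + indA a g d K := by
    intro K acc; rw [indA]; split_ifs <;> ring
  simp only [hbase]
  have L4 : ∀ (i j k start acc : Int),
      (PySem.List.pyRange start ((a.length : Int) - 1) 1).foldl
        (fun acc l => acc + indA a g d [i, j, k, l]) acc = acc + SB a g d 1 start [i, j, k] := by
    intro i j k start acc
    rw [foldl_shift _ _ (fun l => indA a g d [i, j, k, l]) acc (fun _ _ _ => rfl)]
    congr 1
    rw [SB]
    exact (congrArg List.sum (List.map_congr_left (fun x _ => by simp [SB]))).symm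
  have L3 : ∀ (i j start acc : Int),
      (PySem.List.pyRange start ((a.length : Int) - 1) 1).foldl
        (fun acc k => (PySem.List.pyRange (k + 1) ((a.length : Int) - 1) 1).foldl
          (fun acc l => acc + indA a g d [i, j, k, l]) (acc + indA a g d [i, j, k])) acc
        = acc + SB a g d 2 start [i, j] := by
    intro i j start acc
    rw [foldl_shift _ _ (fun k => indA a g d [i, j, k] + SB a g d 1 (k + 1) [i, j, k]) acc
      (fun acc2 k _ => by rw [L4]; ring)]
    congr 1
  have L2 : ∀ (i start acc : Int),
      (PySem.List.pyRange start ((a.length : Int) - 1) 1).foldl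
        (fun acc j => (PySem.List.pyRange (j + 1) ((a.length : Int) - 1) 1).foldl
          (fun acc k => (PySem.List.pyRange (k + 1) ((a.length : Int) - 1) 1).foldl
            (fun acc l => acc + indA a g d [i, j, k, l]) (acc + indA a g d [i, j, k]))
          (acc + indA a g d [i, j])) acc
        = acc + SB a g d 3 start [i] := by
    intro i start acc
    rw [foldl_shift _ _ (fun j => indA a g d [i, j] + SB a g d 2 (j + 1) [i, j]) acc
      (fun acc2 j _ => by rw [L3]; ring)]
    congr 1
  have L1 : ∀ (start acc : Int),
      (PySem.List.pyRange start ((a.length : Int) - 1) 1).foldl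
        (fun acc i => (PySem.List.pyRange (i + 1) ((a.length : Int) - 1) 1).foldl
          (fun acc j => (PySem.List.pyRange (j + 1) ((a.length : Int) - 1) 1).foldl
            (fun acc k => (PySem.List.pyRange (k + 1) ((a.length : Int) - 1) 1).foldl
              (fun acc l => acc + indA a g d [i, j, k, l]) (acc + indA a g d [i, j, k]))
            (acc + indA a g d [i, j]))
          (acc + indA a g d [i])) acc
        = acc + SB a g d 4 start [] := by
    intro start acc
    rw [foldl_shift _ _ (fun i => indA a g d [i] + SB a g d 3 (i + 1) [i]) acc
      (fun acc2 i _ => by rw [L2]; ring)]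
    congr 1
  exact L1 1 1

theorem take_succ_concat (a : List Int) (M : Nat) (h : M < a.length) :
    a.take (M + 1) = a.take M ++ [a[M]] := by
  rw [List.take_succ, List.getElem?_eq_getElem h]
  rfl

theorem keepP (a : List Int) (js : List Int) (M : Nat) (hM : M < a.length)
    (hjs : ∀ p ∈ js, p < (M : Int)) :
    delF js (a.take (M + 1)) 0 = delF js (a.take M) 0 ++ [a[M]] := by
  rw [take_succ_concat a M hM, delF_append]
  congr 1
  rw [List.length_take, Nat.min_eq_left (by omega)]
  have hnm : (0 : Int) + (M : Nat) ∉ js := by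
    intro c; have := hjs _ c; omega
  simp only [delF, if_neg hnm]

theorem removeP (a : List Int) (js : List Int) (M : Nat) (hM : M < a.length)
    (hjs : ∀ p ∈ js, p < (M : Int)) :
    delF (js ++ [(M : Int)]) (a.take (M + 1)) 0 = delF js (a.take M) 0 := by
  rw [take_succ_concat a M hM, delF_append]
  have h2 : delF (js ++ [(M : Int)]) [a[M]] (0 + (a.take M).length) = [] := by
    rw [List.length_take, Nat.min_eq_left (by omega)]
    have : (0 : Int) + (M : Nat) ∈ js ++ [(M : Int)] := by simp
    simp only [delF, if_pos this]
  rw [h2, List.append_nil]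
  refine delF_sub _ _ _ _ (fun q hq1 hq2 => ?_)
  rw [List.length_take, Nat.min_eq_left (by omega)] at hq2
  simp only [List.mem_append, List.mem_cons, List.not_mem_nil, or_false]
  constructor
  · rintro (h | h); exact h; omega
  · exact fun h => Or.inl h

theorem P_ne_nil (a : List Int) (js : List Int) (M : Nat) (hM : 1 ≤ M) (hl : a ≠ [])
    (h0 : (0 : Int) ∉ js) : delF js (a.take M) 0 ≠ [] := by
  have : a.take M ≠ [] := by
    cases a with
    | nil => simp at hl
    | cons x t => cases M with | zero => omega | succ M => simp
  rw [delF_cons_head js (a.take M) this h0]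
  simp

theorem getLastD_drop (a : List Int) (k : Nat) (h : k < a.length) :
    (a.drop k).getLastD 0 = a.getLastD 0 := by
  induction a generalizing k with
  | nil => simp at h
  | cons x t ih =>
    cases k with
    | zero => rfl
    | succ k =>
      rw [List.drop_succ_cons, ih k (by simpa using h)]
      rw [List.getLastD_eq_getLast?, List.getLastD_eq_getLast?]
      cases t with
      | nil => simp at h
      | cons y s => rfl

theorem drop_decomp (a : List Int) (M : Nat) (h : M + 1 < a.length) :
    a.drop M = a[M] :: ((a.drop (M + 1)).dropLast ++ [a.getLastD 0]) ∧
    (a.drop M).dropLast = a[M] :: (a.drop (M + 1)).dropLast := by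
  have hne : a.drop (M + 1) ≠ [] := by
    intro c
    have := congrArg List.length c
    rw [List.length_drop] at this
    simp at this
    omega
  have hgl : ∀ (l : List Int) (hl : l ≠ []), l.getLast hl = l.getLastD 0 := by
    intro l hl
    rw [List.getLastD_eq_getLast?, List.getLast?_eq_getLast hl]
    rfl
  have hlast : (a.drop (M + 1)).getLast hne = a.getLastD 0 := by
    rw [hgl _ hne, getLastD_drop a (M+1) (by omega)]
  have hsplit : a.drop (M + 1) = (a.drop (M + 1)).dropLast ++ [a.getLastD 0] := by
    conv_lhs => rw [← List.dropLast_concat_getLast hne]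
    rw [hlast]
  have hcons : a.drop M = a[M] :: a.drop (M + 1) := List.drop_eq_getElem_cons (by omega)
  constructor
  · rw [hcons, ← hsplit]
  · rw [hcons, List.dropLast_cons_of_ne_nil hne]

theorem drop_concat (a : List Int) (k : Nat) (h : k < a.length) :
    a.drop k = (a.drop k).dropLast ++ [a.getLastD 0] := by
  have hne : a.drop k ≠ [] := by
    intro c
    have := congrArg List.length c
    rw [List.length_drop] at this
    simp at this
    omega
  have hgl : (a.drop k).getLast hne = a.getLastD 0 := by
    have h1 : (a.drop k).getLast hne = (a.drop k).getLastD 0 := by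
      rw [List.getLastD_eq_getLast?, List.getLast?_eq_getLast hne]
      rfl
    rw [h1, getLastD_drop a k h]
  conv_lhs => rw [← List.dropLast_concat_getLast hne]
  rw [hgl]

theorem main_A (a : List Int) (hnd : a.Nodup) (hl : a ≠ []) :
    ∀ (fuel b : Nat) (m : Int) (js : List Int),
      ((a.length : Int) - 1 - m).toNat = fuel → 1 ≤ m → m ≤ (a.length : Int) - 1 →
      js.Pairwise (· < ·) → (∀ p ∈ js, 1 ≤ p ∧ p < m) →
      SB a (a.headD 0) (a.getLastD 0) b m js =
        if gOK (delF js (a.take m.toNat) 0) = true then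
          scnt (a.getLastD 0) ((a.drop m.toNat).dropLast) ((delF js (a.take m.toNat) 0).getLastD 0) b
        else 0 := by
  intro fuel
  induction fuel with
  | zero =>
    intro b m js hf h1 h2 hpw hb
    have hstop : (a.length : Int) - 1 ≤ m := by omega
    rw [SB_stop _ _ _ _ _ _ hstop]
    have hm : m.toNat = a.length - 1 := by
      have h0 : 0 < a.length := List.length_pos_iff.mpr hl
      omega
    rw [hm, drop_pred a hl]
    simp [scnt_nil]
  | succ f ih =>
    intro b m js hf h1 h2 hpw hb
    obtain ⟨M, rfl⟩ : ∃ M : Nat, m = (M : Int) := ⟨m.toNat, by omega⟩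
    have hMt : ((M : Int)).toNat = M := by omega
    have hM1t : ((M : Int) + 1).toNat = M + 1 := by omega
    have hlt : (M : Int) < (a.length : Int) - 1 := by omega
    have hMlen : M + 1 < a.length := by omega
    cases b with
    | zero =>
      have hz : SB a (a.headD 0) (a.getLastD 0) 0 ((M : Int)) js = 0 := rfl
      rw [hz]
      split_ifs <;> rfl
    | succ b =>
      rw [SB_cons _ _ _ _ _ _ hlt]
      have h0js : (0 : Int) ∉ js := fun c => by have := (hb 0 c).1; omega
      have hjs' : ∀ p ∈ js, p < (M : Int) := fun p hp => (hb p hp).2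
      have hPne := P_ne_nil a js M (by omega) hl h0js
      have hd2 := (drop_decomp a M hMlen).2
      have hdropc := drop_concat a (M + 1) (by omega)
      -- (1) the indA term
      have hpw' : (js ++ [(M : Int)]).Pairwise (· < ·) := by
        rw [List.pairwise_append]
        exact ⟨hpw, List.pairwise_singleton _ _, fun x hx y hy => by
          simp at hy; subst hy; exact hjs' x hx⟩
      have hbnd' : ∀ p ∈ js ++ [(M : Int)], 1 ≤ p ∧ p < (a.length : Int) - 1 := by
        intro p hp
        rcases List.mem_append.mp hp with h | h
        · have := hb p h; omega
        · simp at h; subst h; omega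
      have hdel : delF (js ++ [(M : Int)]) a 0 = delF js (a.take M) 0 ++ a.drop (M + 1) := by
        rw [delF_split (js ++ [(M : Int)]) a (M + 1) (by omega)
          (fun p hp => by have := hbnd' p hp; rcases List.mem_append.mp hp with h | h
                          · have := hjs' p h; push_cast; omega
                          · simp at h; subst h; push_cast; omega)]
        rw [removeP a js M (by omega) hjs']
      have hindA : indA a (a.headD 0) (a.getLastD 0) (js ++ [(M : Int)]) =
          if gOK (delF js (a.take M) 0) = true then
            cnt (a.getLastD 0) ((a.drop (M + 1)).dropLast) ((delF js (a.take M) 0).getLastD 0) 0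
          else 0 := by
        rw [indA_eq a hnd hl _ hpw' hbnd', hdel,
          gOK_append _ _ hPne, cnt_zero, ← hdropc]
        cases h1 : gOK (delF js (a.take M) 0) <;> simp
      -- (2) first IH
      have hih1 := ih b ((M : Int) + 1) (js ++ [(M : Int)]) (by omega) (by omega) (by omega) hpw'
        (fun p hp => by rcases List.mem_append.mp hp with h | h
                        · have := hb p h; omega
                        · simp at h; subst h; omega)
      rw [hM1t, removeP a js M (by omega) hjs'] at hih1
      -- (3) second IH
      have hih2 := ih (b + 1) ((M : Int) + 1) js (by omega) (by omega) (by omega) hpw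
        (fun p hp => by have := hb p hp; omega)
      rw [hM1t, keepP a js M (by omega) hjs'] at hih2
      have hgokk : gOK (delF js (a.take M) 0 ++ [a[M]]) =
          (gOK (delF js (a.take M) 0) && decide (a[M] - (delF js (a.take M) 0).getLastD 0 ≤ 3)) := by
        rw [gOK_append _ _ hPne]
        simp [gOK]
      have hlastk : (delF js (a.take M) 0 ++ [a[M]]).getLastD 0 = a[M] := by
        rw [List.getLastD_eq_getLast?, List.getLast?_append]
        simp
      rw [hgokk, hlastk] at hih2
      -- assemble
      rw [hindA, hih1, hih2, hMt, hd2, scnt_cons]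
      cases hP : gOK (delF js (a.take M) 0) with
      | false => simp
      | true =>
        by_cases hgap : a[M] - (delF js (a.take M) 0).getLastD 0 ≤ 3
        · simp only [hgap, decide_true, Bool.and_true, if_true]
          simp
          ring
        · simp only [hgap, decide_false, Bool.and_false, if_false]
          simp

theorem A_eq_mid (a : List Int) (hnd : a.Nodup) (hn : 2 ≤ a.length) :
    findNAllowedConfigurations a =
      1 + scnt (a.getLastD 0) ((a.drop 1).dropLast) (a.headD 0) 4 := by
  have hl : a ≠ [] := by intro c; subst c; simp at hn
  rw [portA_eq_SB, pyGet_head, pyGet_last a hl]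
  congr 1
  rw [main_A a hnd hl ((a.length : Int) - 1 - 1).toNat 4 1 [] rfl (by omega) (by omega)
    List.Pairwise.nil (by simp)]
  rw [delF_nilK]
  cases a with
  | nil => simp at hn
  | cons x t =>
    have h1 : (x :: t).take (1 : Int).toNat = [x] := rfl
    rw [h1]
    simp [gOK]


def cell (a : List Int) : Nat → Nat → Nat → Int
  | 0, off, r =>
      if r = 0 ∧ ((a.length : Int) - 1 - (off : Int) ≥ 0 ∧
          PySem.List.pyGetD a ((a.length : Int) - 1) 0 -
            PySem.List.pyGetD a ((a.length : Int) - 1 - (off : Int)) 0 ≤ 3)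
      then 1 else 0
  | fuel+1, off, r =>
      if ((a.length : Int) - 2 - (fuel : Int)) - (off : Int) ≥ 0 then
        (let c : Int := 0
         let c := if PySem.List.pyGetD a ((a.length : Int) - 2 - (fuel : Int)) 0 -
              PySem.List.pyGetD a (((a.length : Int) - 2 - (fuel : Int)) - (off : Int)) 0 ≤ 3 then
            c + cell a fuel 1 r else c
         let c := if 1 ≤ r ∧ off < 5 then c + cell a fuel (off + 1) (r - 1) else c
         c)
      else 0

def mkRow (a : List Int) (fuel : Nat) : List (List Int) :=
  (List.range 5).map (fun o => (List.range 5).map (fun r => cell a fuel (o + 1) r))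

set_option maxHeartbeats 2000000 in
theorem Bstep (a : List Int) (fuel : Nat) (idx : Int)
    (hidx : idx = (a.length : Int) - 2 - (fuel : Int)) :
    (PySem.List.pyRange 1 6 1).foldl (fun new off =>
        let p := idx - off
        let cur :=
          if p ≥ 0 then
            (PySem.List.pyRange 0 5 1).foldl (fun cur r =>
              let c : Int := 0
              let c := if PySem.List.pyGetD a idx 0 - PySem.List.pyGetD a p 0 ≤ 3 then
                  c + PySem.List.pyGetD (PySem.List.pyGetD (mkRow a fuel) 0 []) r 0 else c
              let c := if r ≥ 1 ∧ off < 5 then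
                  c + PySem.List.pyGetD (PySem.List.pyGetD (mkRow a fuel) off []) (r - 1) 0 else c
              cur ++ [c]) []
          else PySem.List.pyRepeat [(0 : Int)] 5
        new ++ [cur]) [] = mkRow a (fuel + 1) := by
  subst hidx
  have hr16 : PySem.List.pyRange 1 6 1 = [1, 2, 3, 4, 5] := by decide
  have hr05 : PySem.List.pyRange 0 5 1 = [0, 1, 2, 3, 4] := by decide
  have hrow0 : PySem.List.pyGetD (mkRow a fuel) 0 [] = (List.range 5).map (fun r => cell a fuel (0 + 1) r) := rfl
  have hrow1 : PySem.List.pyGetD (mkRow a fuel) 1 [] = (List.range 5).map (fun r => cell a fuel (1 + 1) r) := rfl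
  have hrow2 : PySem.List.pyGetD (mkRow a fuel) 2 [] = (List.range 5).map (fun r => cell a fuel (2 + 1) r) := rfl
  have hrow3 : PySem.List.pyGetD (mkRow a fuel) 3 [] = (List.range 5).map (fun r => cell a fuel (3 + 1) r) := rfl
  have hrow4 : PySem.List.pyGetD (mkRow a fuel) 4 [] = (List.range 5).map (fun r => cell a fuel (4 + 1) r) := rfl
  have hrow5 : PySem.List.pyGetD (mkRow a fuel) 5 [] = [] := rfl
  simp only [hr16, hr05, List.foldl_cons, List.foldl_nil, List.nil_append,
    hrow0, hrow1, hrow2, hrow3, hrow4, hrow5]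
  norm_num
  simp only [mkRow, cell, List.range_succ, List.range_zero, List.map_cons, List.map_nil,
    List.map_append, List.nil_append, List.cons_append]
  norm_num [PySem.List.pyGetD_ofNat', PySem.List.pyGetD_natCast]
  all_goals split_ifs <;> simp [List.replicate]

set_option maxHeartbeats 1000000 in
theorem Binit (a : List Int) :
    (PySem.List.pyRange 1 6 1).foldl (fun row off =>
        let p := (a.length : Int) - 1 - off
        let ok := decide (p ≥ 0) &&
          decide (PySem.List.pyGetD a ((a.length : Int) - 1) 0 - PySem.List.pyGetD a p 0 ≤ 3)
        row ++ [(PySem.List.pyRange 0 5 1).map (fun r => if r = 0 ∧ ok = true then (1 : Int) else 0)]) []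
      = mkRow a 0 := by
  have hr16 : PySem.List.pyRange 1 6 1 = [1, 2, 3, 4, 5] := by decide
  have hr05 : PySem.List.pyRange 0 5 1 = [0, 1, 2, 3, 4] := by decide
  simp only [hr16, hr05, List.foldl_cons, List.foldl_nil, List.nil_append, List.map_cons,
    List.map_nil, List.cons_append]
  simp only [mkRow, cell, List.range_succ, List.range_zero, List.map_cons, List.map_nil,
    List.nil_append, List.cons_append]
  norm_num [Bool.and_eq_true, decide_eq_true_eq]

theorem pyGetD_eq_pyGet? (a : List Int) (i : Int) :
    PySem.List.pyGetD a i 0 = (PySem.List.pyGet? a i).getD 0 := rfl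

theorem pyGetD_idx (a : List Int) (k : Nat) (h : k < a.length) :
    PySem.List.pyGetD a ((k : Nat) : Int) 0 = a[k]! := by
  rw [pyGetD_eq_pyGet?, pyGet_mid a _ (by omega) (by push_cast; omega)]
  simp

theorem Bfold (a : List Int) : ∀ j : Nat, j ≤ a.length - 2 →
    (PySem.List.pyRange (j : Int) 0 (-1)).foldl (fun row idx =>
        (PySem.List.pyRange 1 6 1).foldl (fun new off =>
          let p := idx - off
          let cur :=
            if p ≥ 0 then
              (PySem.List.pyRange 0 5 1).foldl (fun cur r =>
                let c : Int := 0
                let c := if PySem.List.pyGetD a idx 0 - PySem.List.pyGetD a p 0 ≤ 3 then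
                    c + PySem.List.pyGetD (PySem.List.pyGetD row 0 []) r 0 else c
                let c := if r ≥ 1 ∧ off < 5 then
                    c + PySem.List.pyGetD (PySem.List.pyGetD row off []) (r - 1) 0 else c
                cur ++ [c]) []
            else PySem.List.pyRepeat [(0 : Int)] 5
          new ++ [cur]) []) (mkRow a (a.length - 2 - j)) = mkRow a (a.length - 2) := by
  intro j
  induction j with
  | zero =>
    intro _
    rw [PySem.List.pyRange_neg_one_eq_nil (by omega)]
    rfl
  | succ j ih =>
    intro hj
    rw [PySem.List.pyRange_neg_one_cons (by push_cast; omega), List.foldl_cons]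
    have hidx : ((j + 1 : Nat) : Int) = (a.length : Int) - 2 - ((a.length - 2 - (j + 1) : Nat) : Int) := by
      omega
    rw [Bstep a (a.length - 2 - (j + 1)) _ hidx]
    have h1 : a.length - 2 - (j + 1) + 1 = a.length - 2 - j := by omega
    have h2 : ((j + 1 : Nat) : Int) - 1 = (j : Nat) := by omega
    rw [h1, h2]
    exact ih (by omega)

theorem cell_eq_cnt (a : List Int) (hn : 3 ≤ a.length) :
    ∀ (fuel off r : Nat), fuel ≤ a.length - 2 → 1 ≤ off → off + r ≤ 5 →
      (off : Int) ≤ (a.length : Int) - 1 - (fuel : Int) →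
      cell a fuel off r =
        cnt (a.getLastD 0) ((a.drop (a.length - 1 - fuel)).dropLast)
          (a[a.length - 1 - fuel - off]!) r := by
  intro fuel
  induction fuel with
  | zero =>
    intro off r hfuel hoff1 hoffr hoffb
    have hl : a ≠ [] := by intro c; subst c; simp at hn
    have hdp : a.drop (a.length - 1 - 0) = [a.getLastD 0] := by
      rw [Nat.sub_zero, drop_pred a hl]
    have hc1 : ((a.length : Int) - 1 - (off : Int) ≥ 0) := by omega
    have hgd1 : PySem.List.pyGetD a ((a.length : Int) - 1) 0 = a.getLastD 0 := by
      rw [pyGetD_eq_pyGet?, pyGet_last a hl]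
    have hcast : (a.length : Int) - 1 - (off : Int) = ((a.length - 1 - off : Nat) : Int) := by omega
    have hgd2 : PySem.List.pyGetD a ((a.length : Int) - 1 - (off : Int)) 0 = a[a.length - 1 - off]! := by
      rw [hcast, pyGetD_idx a _ (by omega)]
    rw [hdp]
    cases r with
    | zero =>
      show (if 0 = 0 ∧ _ then (1:Int) else 0) = cnt _ [] _ 0
      have : cnt (a.getLastD 0) [] (a[a.length - 1 - 0 - off]!) 0 =
          if a.getLastD 0 - a[a.length - 1 - off]! ≤ 3 then 1 else 0 := by
        simp [cnt]
      rw [this, hgd1, hgd2]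
      have hiff : (0 = 0 ∧ ((a.length : Int) - 1 - (off : Int) ≥ 0 ∧
          a.getLastD 0 - a[a.length - 1 - off]! ≤ 3)) ↔ (a.getLastD 0 - a[a.length - 1 - off]! ≤ 3) :=
        ⟨fun h => h.2.2, fun h => ⟨rfl, hc1, h⟩⟩
      rw [if_congr hiff rfl rfl]
    | succ r =>
      show (if (r + 1) = 0 ∧ _ then (1:Int) else 0) = cnt _ [] _ (r + 1)
      rw [cnt_nil_succ, if_neg (by simp)]
  | succ fuel ih =>
    intro off r hfuel hoff1 hoffr hoffb
    have hl : a ≠ [] := by intro c; subst c; simp at hn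
    set M : Nat := a.length - 2 - fuel with hM
    have hM1 : M + 1 < a.length := by omega
    have hMfuel : a.length - 1 - (fuel + 1) = M := by omega
    have hd2 := (drop_decomp a M hM1).2
    have hmc : (a.length : Int) - 2 - (fuel : Int) = ((M : Nat) : Int) := by omega
    have hcond : ((a.length : Int) - 2 - (fuel : Int)) - (off : Int) ≥ 0 := by omega
    have hgy : PySem.List.pyGetD a ((a.length : Int) - 2 - (fuel : Int)) 0 = a[M]! := by
      rw [hmc, pyGetD_idx a M (by omega)]
    have hxcast : (a.length : Int) - 2 - (fuel : Int) - (off : Int) = ((M - off : Nat) : Int) := by omega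
    have hgx : PySem.List.pyGetD a ((a.length : Int) - 2 - (fuel : Int) - (off : Int)) 0 =
        a[M - off]! := by
      rw [hxcast, pyGetD_idx a _ (by omega)]
    have hih1 : cell a fuel 1 r =
        cnt (a.getLastD 0) ((a.drop (a.length - 1 - fuel)).dropLast) (a[a.length - 1 - fuel - 1]!) r :=
      ih 1 r (by omega) (by omega) (by omega) (by omega)
    have hidx1 : a.length - 1 - fuel - 1 = M := by omega
    have hMeq : a.length - 1 - fuel = M + 1 := by omega
    rw [hidx1, hMeq] at hih1
    -- goal
    show (if ((a.length : Int) - 2 - (fuel : Int)) - (off : Int) ≥ 0 then _ else 0) = _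
    rw [if_pos hcond, hMfuel, hd2, hgy, hgx]
    simp only []
    have hb1 : a[M]! = a[M] := by
      simp [List.getElem!_eq_getElem?_getD, List.getElem?_eq_getElem (show M < a.length by omega)]
    cases r with
    | zero =>
      have hnr : ¬ (1 ≤ 0 ∧ off < 5) := by omega
      rw [if_neg hnr]
      have : cnt (a.getLastD 0) (a[M] :: (a.drop (M + 1)).dropLast) (a[M - off]!) 0 =
          if a[M]! - a[M - off]! ≤ 3 then cnt (a.getLastD 0) ((a.drop (M + 1)).dropLast) (a[M]!) 0
          else 0 := by
        rw [hb1]; rfl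
      rw [this]
      split_ifs with h
      · rw [zero_add, hih1]
      · rfl
    | succ r =>
      have hyr : (1 ≤ r + 1 ∧ off < 5) ↔ off < 5 := by omega
      have hih2 : off < 5 → cell a fuel (off + 1) (r + 1 - 1) =
          cnt (a.getLastD 0) ((a.drop (M + 1)).dropLast) (a[M - off]!) r := by
        intro hoff5
        have := ih (off + 1) r (by omega) (by omega) (by omega) (by omega)
        rw [hMeq, show M + 1 - (off + 1) = M - off by omega] at this
        simpa using this
      have hcntc : cnt (a.getLastD 0) (a[M] :: (a.drop (M + 1)).dropLast) (a[M - off]!) (r + 1) =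
          (if a[M]! - a[M - off]! ≤ 3 then
            cnt (a.getLastD 0) ((a.drop (M + 1)).dropLast) (a[M]!) (r + 1) else 0) +
          cnt (a.getLastD 0) ((a.drop (M + 1)).dropLast) (a[M - off]!) r := by
        rw [hb1]; rfl
      rw [hcntc]
      by_cases hoff5 : off < 5
      · rw [if_pos (hyr.mpr hoff5), hih2 hoff5, hih1]
        split_ifs <;> ring
      · -- off = 5: then off + (r+1) ≤ 5 forces contradiction
        omega

set_option maxHeartbeats 1000000 in
theorem B_eq_mid (a : List Int) (hn : 3 ≤ a.length) :
    findNAllowedConfigurations_alt a =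
      1 + scnt (a.getLastD 0) ((a.drop 1).dropLast) (a.headD 0) 4 := by
  have hl : a ≠ [] := by intro c; subst c; simp at hn
  unfold findNAllowedConfigurations_alt
  simp only []
  rw [if_neg (show ¬ ((a.length : Int) ≤ 2) by push_cast; omega)]
  rw [Binit a]
  have hbf := Bfold a (a.length - 2) (le_refl _)
  rw [Nat.sub_self] at hbf
  rw [show ((a.length : Int) - 2) = ((a.length - 2 : Nat) : Int) by omega, hbf]
  have hget : ∀ r : Nat, r < 5 →
      PySem.List.pyGetD (PySem.List.pyGetD (mkRow a (a.length - 2)) 0 []) ((r : Nat) : Int) 0 =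
        cell a (a.length - 2) 1 r := by
    intro r hr
    have h0 : PySem.List.pyGetD (mkRow a (a.length - 2)) 0 [] =
        (List.range 5).map (fun r => cell a (a.length - 2) (0 + 1) r) := rfl
    rw [h0, pyGetD_eq_pyGet?, PySem.List.pyGet?_natCast]
    rw [List.getElem?_map, List.getElem?_range hr]
    rfl
  have hg1 : PySem.List.pyGetD (PySem.List.pyGetD (mkRow a (a.length - 2)) 0 []) 1 0 =
      cell a (a.length - 2) 1 1 := by
    have := hget 1 (by omega); simpa using this
  have hg2 : PySem.List.pyGetD (PySem.List.pyGetD (mkRow a (a.length - 2)) 0 []) 2 0 =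
      cell a (a.length - 2) 1 2 := by
    have := hget 2 (by omega); simpa using this
  have hg3 : PySem.List.pyGetD (PySem.List.pyGetD (mkRow a (a.length - 2)) 0 []) 3 0 =
      cell a (a.length - 2) 1 3 := by
    have := hget 3 (by omega); simpa using this
  have hg4 : PySem.List.pyGetD (PySem.List.pyGetD (mkRow a (a.length - 2)) 0 []) 4 0 =
      cell a (a.length - 2) 1 4 := by
    have := hget 4 (by omega); simpa using this
  rw [hg1, hg2, hg3, hg4]
  have hcell : ∀ r : Nat, 1 ≤ r → r ≤ 4 →
      cell a (a.length - 2) 1 r =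
        cnt (a.getLastD 0) ((a.drop 1).dropLast) (a.headD 0) r := by
    intro r h1 h4
    rw [cell_eq_cnt a hn (a.length - 2) 1 r (le_refl _) (le_refl _) (by omega) (by omega)]
    rw [show a.length - 1 - (a.length - 2) = 1 by omega]
    norm_num
    cases a with
    | nil => simp at hl
    | cons x t => rfl
  rw [hcell 1 (by omega) (by omega), hcell 2 (by omega) (by omega),
    hcell 3 (by omega) (by omega), hcell 4 (by omega) (by omega)]
  simp only [scnt]
  ring

theorem final_eq (a : List Int) (h1 : a ≠ []) (h2 : a.Nodup) :
    findNAllowedConfigurations a = findNAllowedConfigurations_alt a := by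
  by_cases hn : 3 ≤ a.length
  · rw [A_eq_mid a h2 (by omega), B_eq_mid a hn]
  · have hp : 0 < a.length := List.length_pos_iff.mpr h1
    have hlen : a.length = 1 ∨ a.length = 2 := by omega
    have hA : findNAllowedConfigurations a = 1 := by
      unfold findNAllowedConfigurations
      simp only []
      rw [PySem.List.pyRange_one_eq_nil (by rcases hlen with h | h <;> rw [h] <;> norm_num)]
      rfl
    have hB : findNAllowedConfigurations_alt a = 1 := by
      unfold findNAllowedConfigurations_alt
      simp only []
      rw [if_pos (show (a.length : Int) ≤ 2 by rcases hlen with h | h <;> rw [h] <;> norm_num)]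
    rw [hA, hB]

-- ===== VERDICT (by name: the statement is the Claim_ definition above) =====
theorem findNAllowedConfigurations_spec : Claim_equal_findNAllowedConfigurations := by
  intro outputJoltages _ hpre
  unfold Spec_findNAllowedConfigurations
  exact final_eq outputJoltages hpre.1 hpre.2
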